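-- pv_equiv track=rewrite | github.com/rsm-wew068/graph-ai-task-manager | utils/gmail_smart_filters.py | _is_auto_reply
-- ===== SOURCE A (Python) =====
-- from typing import List, Dict, Any, Optional
--
-- def _is_auto_reply(email: Dict[str, Any]) -> bool:
--     """Check if email is an auto-reply"""
--     subject = email.get('subject', '').lower()
--     body = email.get('body', '').lower()
--
--     auto_reply_indicators = [
--         'out of office', 'automatic reply', 'auto reply', 'auto-reply',
--         'vacation', 'away', 'unavailable', 'out of the office',
--         'automatic response', 'auto response'
--     ]
--
--     return any(indicator in subject or indicator in body
--               for indicator in auto_reply_indicators)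
-- ===== SOURCE B (Python) =====
-- # Compiles the indicator list once into a first-child/next-sibling trie, then
-- # scans each field by walking the trie from every start position, so shared
-- # keyword prefixes ('auto ...', 'out of ...') are examined once per position.
-- _INDICATORS = [
--     'out of office', 'automatic reply', 'auto reply', 'auto-reply',
--     'vacation', 'away', 'unavailable', 'out of the office',
--     'automatic response', 'auto response'
-- ]
--
-- def _insert(node, word):
--     """node: None or (char, is_end, first_child, next_sibling)."""
--     if node is None:
--         if not word:
--             return None
--         return (word[0], len(word) == 1, _insert(None, word[1:]), None)
--     if not word:
--         return node
--     c, end, child, sib = node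
--     if word[0] == c:
--         return (c, end or len(word) == 1, _insert(child, word[1:]), sib)
--     return (c, end, child, _insert(sib, word))
--
-- _TRIE = None
-- for _w in _INDICATORS:
--     _TRIE = _insert(_TRIE, _w)
--
-- def _matches_here(node, text, i):
--     """Does some stored word start at position i of text? Walk the trie."""
--     while node is not None and i < len(text):
--         c, end, child, sib = node
--         if text[i] == c:
--             if end:
--                 return True
--             node, i = child, i + 1
--         else:
--             node = sib
--     return False
--
-- def _is_auto_reply(email):
--     """Check if email is an auto-reply"""
--     def hit(text):
--         return any(_matches_here(_TRIE, text, i) for i in range(len(text)))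
--     return hit(email.get('subject', '').lower()) or hit(email.get('body', '').lower())
-- ===== Notes on version B (the rewrite author's own statement) =====
-- stated objective: alternative
-- what changed: Replaces the per-indicator substring scans with a trie (first-child/next-sibling) compiled once from the indicator list; each field is scanned position by position walking the trie, so all keywords are matched simultaneously and shared prefixes like 'auto'/'out of' are tested once per position.
import Mathlib
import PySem

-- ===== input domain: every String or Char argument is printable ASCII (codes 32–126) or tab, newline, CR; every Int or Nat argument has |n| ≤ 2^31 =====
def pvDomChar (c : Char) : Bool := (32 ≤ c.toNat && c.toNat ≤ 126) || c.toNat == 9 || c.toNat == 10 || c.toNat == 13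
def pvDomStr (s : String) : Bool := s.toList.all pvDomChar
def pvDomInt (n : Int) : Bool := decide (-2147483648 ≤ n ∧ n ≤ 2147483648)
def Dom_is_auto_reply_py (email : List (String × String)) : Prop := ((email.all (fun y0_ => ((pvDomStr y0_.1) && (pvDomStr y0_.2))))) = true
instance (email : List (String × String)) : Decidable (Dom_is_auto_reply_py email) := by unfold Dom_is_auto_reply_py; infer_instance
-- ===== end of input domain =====

-- B replaces per-indicator substring scans with one trie compiled from the list, walked at each position (alternative data structure; return value only).

-- ===== PORT A =====
-- the indicator list of _is_auto_reply, in source order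
def pvIndicators : List String :=
  ["out of office", "automatic reply", "auto reply", "auto-reply",
   "vacation", "away", "unavailable", "out of the office",
   "automatic response", "auto response"]

-- A: for each indicator, test 'indicator in subject or indicator in body'
def is_auto_reply_py (email : List (String × String)) : Bool :=
  let subject := PySem.Str.lower (PySem.Dict.getD (PySem.Dict.mk email) "subject" "")
  let body := PySem.Str.lower (PySem.Dict.getD (PySem.Dict.mk email) "body" "")
  pvIndicators.any (fun ind => PySem.Str.isIn ind subject || PySem.Str.isIn ind body)

-- ===== PORT B =====
-- first-child/next-sibling trie, as Source B's tuples (char, is_end, child, sibling) / None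
inductive PvTrie where
  | nil : PvTrie
  | node : Char → Bool → PvTrie → PvTrie → PvTrie
deriving DecidableEq, Repr

-- Source B's _insert(None, word): the fresh chain built in the 'node is None' branch
def pvFresh : List Char → PvTrie
  | [] => .nil
  | x :: xs => .node x xs.isEmpty (pvFresh xs) .nil

-- Source B's _insert
def pvInsert : PvTrie → List Char → PvTrie
  | .nil, w => pvFresh w
  | t, [] => t
  | .node c e ch sib, x :: xs =>
      if x = c then .node c (e || xs.isEmpty) (pvInsert ch xs) sib
      else .node c e ch (pvInsert sib (x :: xs))

-- the module-level loop building _TRIE from the indicator list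
def pvTrie : PvTrie := (pvIndicators.map String.toList).foldl pvInsert .nil

-- Source B's _matches_here: walk the trie along the text from one position
def pvMatchesHere : PvTrie → List Char → Bool
  | .nil, _ => false
  | .node _ _ _ _, [] => false
  | .node c e ch sib, x :: xs =>
      if x = c then e || pvMatchesHere ch xs
      else pvMatchesHere sib (x :: xs)

-- Source B's hit: any(_matches_here(trie, text, i) for i in range(len(text)))
def pvHit (t : PvTrie) : List Char → Bool
  | [] => false
  | c :: cs => pvMatchesHere t (c :: cs) || pvHit t cs

def is_auto_reply_py_alt (email : List (String × String)) : Bool :=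
  pvHit pvTrie (PySem.Str.lower (PySem.Dict.getD (PySem.Dict.mk email) "subject" "")).toList
    || pvHit pvTrie (PySem.Str.lower (PySem.Dict.getD (PySem.Dict.mk email) "body" "")).toList

-- ===== PRECONDITION & SPEC =====
def Spec_is_auto_reply_py (email : List (String × String)) (out : Bool) : Prop := out = is_auto_reply_py_alt email
instance (email : List (String × String)) (out : Bool) : Decidable (Spec_is_auto_reply_py email out) := by unfold Spec_is_auto_reply_py; infer_instance

-- ===== CLAIM =====
def Claim_equal_is_auto_reply_py : Prop := ∀ (email : List (String × String)), Dom_is_auto_reply_py email → Spec_is_auto_reply_py email (is_auto_reply_py email)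

-- ===== LEMMAS AND PROOFS =====

theorem pvInsert_nilw (t : PvTrie) : pvInsert t [] = t := by
  cases t <;> rfl

theorem pvMatchesHere_fresh (w s : List Char) :
    pvMatchesHere (pvFresh w) s = true ↔ w ≠ [] ∧ w <+: s := by
  induction w generalizing s with
  | nil => simp [pvFresh, pvMatchesHere]
  | cons x xs ih =>
      cases s with
      | nil => simp [pvFresh, pvMatchesHere]
      | cons y ys =>
          simp only [pvFresh, pvMatchesHere]
          by_cases h : y = x
          · subst h
            rw [if_pos rfl]
            by_cases hxs : xs = []
            · subst hxs
              simp
            · simp only [Bool.or_eq_true, List.isEmpty_iff, hxs, false_or, ih,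
                List.cons_prefix_cons]
              tauto
          · rw [if_neg h]
            simp only [List.cons_prefix_cons, Ne.symm h]
            simp

theorem pvMatchesHere_insert (t : PvTrie) (w s : List Char) :
    pvMatchesHere (pvInsert t w) s = true ↔
      pvMatchesHere t s = true ∨ (w ≠ [] ∧ w <+: s) := by
  induction t generalizing w s with
  | nil =>
      rw [show pvInsert .nil w = pvFresh w from rfl, pvMatchesHere_fresh]
      simp [pvMatchesHere]
  | node c e ch sib ihc ihs =>
      cases w with
      | nil => simp [pvInsert_nilw]
      | cons x xs =>
          simp only [pvInsert]
          by_cases hx : x = c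
          · subst hx
            rw [if_pos rfl]
            cases s with
            | nil => simp [pvMatchesHere]
            | cons y ys =>
                simp only [pvMatchesHere]
                by_cases hy : y = x
                · subst hy
                  rw [if_pos rfl, if_pos rfl]
                  by_cases hxs : xs = []
                  · subst hxs
                    rw [pvInsert_nilw]
                    simp [List.cons_prefix_cons]
                  · simp only [Bool.or_eq_true, List.isEmpty_iff, hxs, or_false, ihc,
                      List.cons_prefix_cons, ne_eq, reduceCtorEq, not_false_iff, true_and]
                    tauto
                · rw [if_neg hy, if_neg hy]
                  simp only [List.cons_prefix_cons, Ne.symm hy]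
                  simp
          · rw [if_neg hx]
            cases s with
            | nil => simp [pvMatchesHere]
            | cons y ys =>
                simp only [pvMatchesHere]
                by_cases hy : y = c
                · subst hy
                  rw [if_pos rfl, if_pos rfl]
                  simp only [List.cons_prefix_cons, hx]
                  simp
                · rw [if_neg hy, if_neg hy, ihs]

theorem pvMatchesHere_foldl (ws : List (List Char)) (t : PvTrie) (s : List Char) :
    pvMatchesHere (ws.foldl pvInsert t) s = true ↔
      pvMatchesHere t s = true ∨ ∃ w ∈ ws, w ≠ [] ∧ w <+: s := by
  induction ws generalizing t with
  | nil => simp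
  | cons w ws ih =>
      simp only [List.foldl_cons, ih, pvMatchesHere_insert, List.mem_cons]
      aesop

theorem pvHit_iff (t : PvTrie) (s : List Char) :
    pvHit t s = true ↔ ∃ u, u <:+ s ∧ pvMatchesHere t u = true := by
  induction s with
  | nil =>
      simp only [pvHit]
      refine ⟨fun h => absurd h (by simp), ?_⟩
      rintro ⟨u, hu, hm⟩
      rw [List.suffix_nil.mp hu] at hm
      cases t <;> simp [pvMatchesHere] at hm
  | cons c cs ih =>
      simp only [pvHit, Bool.or_eq_true, ih]
      constructor
      · rintro (h | ⟨u, hu, hm⟩)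
        · exact ⟨c :: cs, List.suffix_refl _, h⟩
        · exact ⟨u, hu.trans (List.suffix_cons c cs), hm⟩
      · rintro ⟨u, hu, hm⟩
        rcases List.suffix_cons_iff.mp hu with rfl | hu
        · exact Or.inl hm
        · exact Or.inr ⟨u, hu, hm⟩

theorem pvHit_trie (s : List Char) :
    pvHit pvTrie s = true ↔ ∃ ind ∈ pvIndicators, ind.toList <:+: s := by
  have hne : ∀ ind ∈ pvIndicators, ind.toList ≠ [] := by decide
  simp only [pvHit_iff, pvTrie, pvMatchesHere_foldl]
  constructor
  · rintro ⟨u, hu, h | ⟨w, hw, _, hp⟩⟩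
    · simp [pvMatchesHere] at h
    · rcases List.mem_map.mp hw with ⟨ind, hind, rfl⟩
      exact ⟨ind, hind, List.infix_iff_prefix_suffix.mpr ⟨u, hp, hu⟩⟩
  · rintro ⟨ind, hind, hinf⟩
    rcases List.infix_iff_prefix_suffix.mp hinf with ⟨u, hp, hu⟩
    exact ⟨u, hu, Or.inr ⟨ind.toList, List.mem_map_of_mem hind, hne ind hind, hp⟩⟩

theorem is_auto_reply_eq (email : List (String × String)) :
    is_auto_reply_py email = is_auto_reply_py_alt email := by
  simp only [is_auto_reply_py, is_auto_reply_py_alt]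
  rw [Bool.eq_iff_iff]
  simp only [Bool.or_eq_true, List.any_eq_true, PySem.Str.isIn_iff_infix, pvHit_trie]
  aesop

-- ===== VERDICT =====
theorem is_auto_reply_py_spec : Claim_equal_is_auto_reply_py := by
  intro email _
  exact is_auto_reply_eq email
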